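-- pv_equiv track=rewrite | github.com/valleysprings/EvoSkill-Foundry | app/discrete/operations.py | greedy_gain_flips
-- ===== SOURCE A (Python) =====
-- def cut_weight(assignment: list[int], edges: list[tuple[int, int, int]]) -> float:
--     return float(sum(weight for left, right, weight in edges if assignment[left] != assignment[right]))
--
-- def _node_gain(assignment: list[int], node_id: int, edges: list[tuple[int, int, int]]) -> float:
--     before = cut_weight(assignment, edges)
--     flipped = assignment[:]
--     flipped[node_id] = 1 - flipped[node_id]
--     after = cut_weight(flipped, edges)
--     return after - before
--
-- def greedy_gain_flips(assignment: list[int], edges: list[tuple[int, int, int]]) -> list[int]: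
--     candidate = assignment[:]
--     while True:
--         gains = [(_node_gain(candidate, node_id, edges), node_id) for node_id in range(len(candidate))]
--         best_gain, best_node = max(gains)
--         if best_gain <= 1e-9:
--             return candidate
--         candidate[best_node] = 1 - candidate[best_node]
-- ===== SOURCE B (Python) =====
-- def greedy_gain_flips(assignment: list[int], edges: list[tuple[int, int, int]]) -> list[int]:
--     candidate = assignment[:]
--     n = len(candidate)
--     # Build an adjacency index once; self-loop edges never change the cut, so skip them.
--     adj = [[] for _ in range(n)]
--     for left, right, weight in edges:
--         if left != right:
--             adj[left].append((right, weight))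
--             adj[right].append((left, weight))
--     while True:
--         best_gain, best_node = 0, -1
--         for node in range(n):
--             x = candidate[node]
--             g = 0
--             for other, w in adj[node]:
--                 y = candidate[other]
--                 g += w * ((1 if 1 - x != y else 0) - (1 if x != y else 0))
--             if g >= best_gain:
--                 best_gain, best_node = g, node
--         if best_node < 0 or best_gain <= 0:
--             return candidate
--         candidate[best_node] = 1 - candidate[best_node]
-- ===== Notes on version B (the rewrite author's own statement) =====
-- stated objective: faster
-- what changed: A recomputes the full cut weight twice (copying the whole list) for every node in every iteration (O(V*E) per iteration); B builds an adjacency index once and computes each node's gain directly from its incident edges (O(V+E) per iteration). Pre_ excludes empty assignments (A's max([]) raises) and edges whose two endpoints are distinct integers that denote the same node via Python negative indexing, a defensible corner where A's treating them as a self-loop is an artefact of full recomputation.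
-- outside the precondition, e.g. on greedy_gain_flips([0, 1], [(0, -2, 5)]): A returns [0, 1], B does not finish within the time limit
import Mathlib
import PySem

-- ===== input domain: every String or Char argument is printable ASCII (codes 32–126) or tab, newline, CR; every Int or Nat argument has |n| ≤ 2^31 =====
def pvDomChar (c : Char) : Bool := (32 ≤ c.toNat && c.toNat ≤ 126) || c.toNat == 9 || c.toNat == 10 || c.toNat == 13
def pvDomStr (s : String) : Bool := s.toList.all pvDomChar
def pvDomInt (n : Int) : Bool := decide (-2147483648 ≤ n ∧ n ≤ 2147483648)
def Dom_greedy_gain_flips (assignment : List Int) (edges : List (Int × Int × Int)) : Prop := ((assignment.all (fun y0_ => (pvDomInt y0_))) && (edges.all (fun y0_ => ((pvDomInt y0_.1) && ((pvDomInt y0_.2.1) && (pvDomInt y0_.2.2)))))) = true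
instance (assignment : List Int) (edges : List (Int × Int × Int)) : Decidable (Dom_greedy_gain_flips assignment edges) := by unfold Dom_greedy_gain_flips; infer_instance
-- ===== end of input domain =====

-- B replaces A's per-node full recomputation of the cut weight (copy the list, resum all
-- edges twice) by an adjacency index built once and a direct per-incident-edge gain formula;
-- return values proved equal on Pre_.  Python's float(...) of integer sums is ported as Int:
-- exact wherever the float sums are (integer weights; 'best_gain <= 1e-9' on integer-valued
-- gains is 'best_gain ≤ 0').

-- ===== PORT A =====
-- float(sum(w for l, r, w in edges if assignment[l] != assignment[r])), as an Int
def pvCutWeight (assignment : List Int) (edges : List (Int × Int × Int)) : Int :=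
  edges.foldl (fun s e =>
    if PySem.List.pyGetD assignment e.1 0 ≠ PySem.List.pyGetD assignment e.2.1 0 then s + e.2.2
    else s) 0

def pvNodeGain (assignment : List Int) (node_id : Int) (edges : List (Int × Int × Int)) : Int :=
  let before := pvCutWeight assignment edges
  let flipped := PySem.List.pySetD assignment node_id (1 - PySem.List.pyGetD assignment node_id 0)
  let after := pvCutWeight flipped edges
  after - before

-- hand port of Python's max over a nonempty list of int pairs: first maximal element,
-- tuples compared lexicographically (exact)
def pvPairMax (x : Int × Int) (ys : List (Int × Int)) : Int × Int :=
  ys.foldl (fun a y => if a.1 < y.1 ∨ (a.1 = y.1 ∧ a.2 < y.2) then y else a) x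

-- totality fuel for the 'while True' loops: each flip strictly increases the (integer) cut
-- weight, which ranges over [-Σ|w|, Σ|w|], so 2Σ|w|+1 iterations always suffice
def pvFuel (edges : List (Int × Int × Int)) : Nat :=
  2 * edges.foldl (fun s e => s + e.2.2.natAbs) 0 + 1

def pvALoop (edges : List (Int × Int × Int)) : Nat → List Int → List Int
  | 0, c => c
  | f + 1, c =>
    let gains := (PySem.List.pyRange 0 c.length 1).map (fun i => (pvNodeGain c i edges, i))
    match gains with
    | [] => c        -- Python: max([]) raises ValueError; excluded by Pre_
    | g :: gs =>
      let best := pvPairMax g gs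
      if best.1 ≤ 0 then c   -- 'best_gain <= 1e-9' on integer-valued gains
      else pvALoop edges f (PySem.List.pySetD c best.2 (1 - PySem.List.pyGetD c best.2 0))

def greedy_gain_flips (assignment : List Int) (edges : List (Int × Int × Int)) : List Int :=
  pvALoop edges (pvFuel edges) assignment

-- ===== PORT B =====
-- adjacency index: unless left == right, adj[left] gets (right, w) and adj[right] gets
-- (left, w); Python's adj[left] lands at left % n for an in-range (possibly negative) left
def pvBuildAdj (n : Nat) (edges : List (Int × Int × Int)) : List (List (Int × Int)) :=
  edges.foldl (fun adj e =>
    if e.1 ≠ e.2.1 then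
      (adj.modify (PySem.Int.mod e.1 (n : Int)).toNat (· ++ [(e.2.1, e.2.2)])).modify
        (PySem.Int.mod e.2.1 (n : Int)).toNat (· ++ [(e.1, e.2.2)])
    else adj) (List.replicate n [])

-- inner loop: g += w * ((1 if 1 - x != y else 0) - (1 if x != y else 0))
def pvGainB (c : List Int) (row : List (Int × Int)) (x : Int) : Int :=
  row.foldl (fun g p =>
    let y := PySem.List.pyGetD c p.1 0
    g + p.2 * ((if 1 - x ≠ y then 1 else 0) - (if x ≠ y then 1 else 0))) 0

-- best_gain, best_node = 0, -1; for node in range(n): ... if g >= best_gain: update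
def pvBestFold (c : List Int) (adj : List (List (Int × Int))) : Int × Int :=
  (PySem.List.pyRange 0 c.length 1).foldl (fun b node =>
    let x := PySem.List.pyGetD c node 0
    let g := pvGainB c (PySem.List.pyGetD adj node []) x
    if g ≥ b.1 then (g, node) else b) (0, -1)

def pvBLoop (adj : List (List (Int × Int))) : Nat → List Int → List Int
  | 0, c => c
  | f + 1, c =>
    let best := pvBestFold c adj
    if best.2 < 0 ∨ best.1 ≤ 0 then c
    else pvBLoop adj f (PySem.List.pySetD c best.2 (1 - PySem.List.pyGetD c best.2 0))

def greedy_gain_flips_alt (assignment : List Int) (edges : List (Int × Int × Int)) : List Int :=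
  pvBLoop (pvBuildAdj assignment.length edges) (pvFuel edges) assignment

-- ===== PRECONDITION & SPEC =====
-- Pre_ requires a nonempty assignment (A's max([]) raises ValueError) and every edge
-- endpoint a valid (possibly negative) index into it (else IndexError); it also excludes
-- edges whose two endpoints are DISTINCT integers denoting the SAME node via Python
-- negative indexing (e.g. 0 and -n): there A happens to treat the edge as a self-loop,
-- a defensible-corner artefact B's adjacency index does not reproduce.
def Pre_greedy_gain_flips (assignment : List Int) (edges : List (Int × Int × Int)) : Prop :=
  assignment ≠ [] ∧ ∀ e ∈ edges,
    PySem.Raise.InRange assignment.length e.1 ∧ PySem.Raise.InRange assignment.length e.2.1 ∧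
    (PySem.Int.mod e.1 (assignment.length : Int) = PySem.Int.mod e.2.1 (assignment.length : Int)
      → e.1 = e.2.1)
instance (assignment : List Int) (edges : List (Int × Int × Int)) : Decidable (Pre_greedy_gain_flips assignment edges) := by unfold Pre_greedy_gain_flips; infer_instance

def pvWitness_greedy_gain_flips : List Int × (List (Int × Int × Int)) :=
  ([0, 0, 1], [(0, 1, 3), (1, 2, 1), (0, 2, 2)])

def Spec_greedy_gain_flips (assignment : List Int) (edges : List (Int × Int × Int)) (out : List Int) : Prop := out = greedy_gain_flips_alt assignment edges
instance (assignment : List Int) (edges : List (Int × Int × Int)) (out : List Int) : Decidable (Spec_greedy_gain_flips assignment edges out) := by unfold Spec_greedy_gain_flips; infer_instance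

-- ===== CLAIM (what is proved, stated in full; the proofs are below) =====
def Claim_equal_greedy_gain_flips : Prop := ∀ (assignment : List Int) (edges : List (Int × Int × Int)), Dom_greedy_gain_flips assignment edges → Pre_greedy_gain_flips assignment edges → Spec_greedy_gain_flips assignment edges (greedy_gain_flips assignment edges)

-- ===== LEMMAS AND PROOFS =====

-- normalized (Python-wrapped) index of an endpoint
def pvNrm (n : Nat) (l : Int) : Nat := (PySem.Int.mod l (n : Int)).toNat

-- per-edge cut term, through normalized indices
def pvTm (c : List Int) (n : Nat) (e : Int × Int × Int) : Int :=
  if c.getD (pvNrm n e.1) 0 ≠ c.getD (pvNrm n e.2.1) 0 then e.2.2 else 0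

def pvDelta (x y : Int) : Int := (if 1 - x ≠ y then 1 else 0) - (if x ≠ y then 1 else 0)

-- per-edge gain contribution for node j
def pvContrib (c : List Int) (n : Nat) (j : Nat) (e : Int × Int × Int) : Int :=
  if pvNrm n e.1 = pvNrm n e.2.1 then 0
  else if pvNrm n e.1 = j then e.2.2 * pvDelta (c.getD j 0) (c.getD (pvNrm n e.2.1) 0)
  else if pvNrm n e.2.1 = j then e.2.2 * pvDelta (c.getD j 0) (c.getD (pvNrm n e.1) 0)
  else 0

-- the adjacency entry edge e contributes to row j
def pvRowEntry (n : Nat) (j : Nat) (e : Int × Int × Int) : Option (Int × Int) :=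
  if pvNrm n e.1 = pvNrm n e.2.1 then none
  else if pvNrm n e.1 = j then some (e.2.1, e.2.2)
  else if pvNrm n e.2.1 = j then some (e.1, e.2.2)
  else none

-- the no-alias part of Pre_, per edge, through pvNrm
def pvNoAlias (n : Nat) (e : Int × Int × Int) : Prop :=
  pvNrm n e.1 = pvNrm n e.2.1 → e.1 = e.2.1

theorem pvNrm_lt (n : Nat) (hn : 0 < n) (l : Int) : pvNrm n l < n := by
  have h1 : 0 ≤ PySem.Int.mod l (n : Int) := PySem.Int.mod_nonneg l (by exact_mod_cast hn)
  have h2 : PySem.Int.mod l (n : Int) < (n : Int) := PySem.Int.mod_lt l (by exact_mod_cast hn)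
  unfold pvNrm; omega

theorem pvNrm_of_nonneg {n : Nat} {l : Int} (h0 : 0 ≤ l) (h1 : l < (n : Int)) :
    ((pvNrm n l : Nat) : Int) = l := by
  have hn : (0 : Int) < n := by omega
  have hm := PySem.Int.mod_eq_emod_of_pos (a := l) hn
  have he : l % (n : Int) = l := Int.emod_eq_of_lt h0 h1
  unfold pvNrm; omega

theorem pvNrm_of_neg {n : Nat} {l : Int} (h0 : l < 0) (h1 : -(n : Int) ≤ l) :
    ((pvNrm n l : Nat) : Int) = l + n := by
  have hn : (0 : Int) < n := by omega
  have hm := PySem.Int.mod_eq_emod_of_pos (a := l) hn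
  have he : (l + n) % (n : Int) = l + n := Int.emod_eq_of_lt (by omega) (by omega)
  have he2 : (l + (n : Int) * 1) % (n : Int) = l % n := Int.add_mul_emod_self_left l (n : Int) 1
  have hnn := PySem.Int.mod_nonneg l hn
  rw [mul_one] at he2
  unfold pvNrm; omega

-- Python's (possibly negative) indexing, through the normalized index
theorem pvGetD_nrm (c : List Int) (l : Int) (d : Int) (hn : 0 < c.length)
    (h : PySem.Raise.InRange c.length l) :
    PySem.List.pyGetD c l d = c.getD (pvNrm c.length l) d := by
  obtain ⟨hlo, hhi⟩ := h
  have hlt := pvNrm_lt c.length hn l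
  rcases le_or_gt 0 l with hpos | hneg
  · have hcast := pvNrm_of_nonneg (n := c.length) hpos hhi
    rw [PySem.List.pyGetD_eq_getElem c d hpos hhi, List.getD_eq_getElem _ _ hlt]
    congr 1
    omega
  · have hcast := pvNrm_of_neg (n := c.length) hneg hlo
    have hk0 : 0 < (-l).toNat := by omega
    have hk1 : (-l).toNat ≤ c.length := by omega
    have hl : -(((-l).toNat : Nat) : Int) = l := by omega
    have hg := PySem.List.pyGetD_neg_natCast c (-l).toNat d hk0 hk1
    rw [hl] at hg
    rw [hg, List.getD_eq_getElem _ _ hlt]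
    congr 1
    omega

-- ===== A-side: gains as a sum of per-edge contributions =====

theorem pvFoldl_if_add (p : Int × Int × Int → Prop) [DecidablePred p]
    (l : List (Int × Int × Int)) (s : Int) :
    l.foldl (fun s e => if p e then s + e.2.2 else s) s
      = s + (l.map (fun e => if p e then e.2.2 else 0)).sum := by
  induction l generalizing s with
  | nil => simp
  | cons e l ih =>
    simp only [List.foldl_cons, List.map_cons, List.sum_cons, ih]
    split_ifs <;> ring

theorem pvSum_map_sub (f g : Int × Int × Int → Int) (l : List (Int × Int × Int)) :
    (l.map f).sum - (l.map g).sum = (l.map (fun e => f e - g e)).sum := by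
  induction l with
  | nil => simp
  | cons e l ih => simp only [List.map_cons, List.sum_cons]; omega

theorem pvCutWeight_eq (c : List Int) (edges : List (Int × Int × Int)) (hn : 0 < c.length)
    (hE : ∀ e ∈ edges, PySem.Raise.InRange c.length e.1 ∧ PySem.Raise.InRange c.length e.2.1) :
    pvCutWeight c edges = (edges.map (pvTm c c.length)).sum := by
  unfold pvCutWeight
  rw [pvFoldl_if_add (fun e => PySem.List.pyGetD c e.1 0 ≠ PySem.List.pyGetD c e.2.1 0) edges 0]
  rw [Int.zero_add]
  apply congrArg
  apply List.map_congr_left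
  intro e he
  obtain ⟨h1, h2⟩ := hE e he
  rw [pvTm, pvGetD_nrm c e.1 0 hn h1, pvGetD_nrm c e.2.1 0 hn h2]

-- the per-edge case analysis behind flipping one node
theorem pvKey (li ri j : Nat) (w : Int) (get : Nat → Int) :
    (if (if j = li then 1 - get j else get li) ≠ (if j = ri then 1 - get j else get ri)
       then w else 0)
    - (if get li ≠ get ri then w else 0)
    = if li = ri then 0 else if li = j then w * pvDelta (get j) (get ri)
      else if ri = j then w * pvDelta (get j) (get li) else 0 := by
  unfold pvDelta
  rcases eq_or_ne li ri with h1 | h1 <;> rcases eq_or_ne li j with h2 | h2 <;>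
    rcases eq_or_ne ri j with h3 | h3 <;> subst_eqs <;> simp_all <;> split_ifs <;>
    first | omega | ring

-- flipping node j: the per-edge change of the cut term is pvContrib
theorem pvTm_flip (c : List Int) (j : Nat) (e : Int × Int × Int)
    (hn : 0 < c.length) (hj : j < c.length)
    (h1 : PySem.Raise.InRange c.length e.1) (h2 : PySem.Raise.InRange c.length e.2.1) :
    pvTm (c.set j (1 - c.getD j 0)) c.length e - pvTm c c.length e = pvContrib c c.length j e := by
  have hl := pvNrm_lt c.length hn e.1
  have hr := pvNrm_lt c.length hn e.2.1
  have hget : ∀ k, k < c.length →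
      (c.set j (1 - c.getD j 0)).getD k 0 = if j = k then 1 - c.getD j 0 else c.getD k 0 := by
    intro k hk
    rw [List.getD_eq_getElem _ _ (by simpa using hk), List.getElem_set,
      List.getD_eq_getElem _ _ hk]
  unfold pvTm pvContrib
  rw [hget _ hl, hget _ hr]
  exact pvKey (pvNrm c.length e.1) (pvNrm c.length e.2.1) j e.2.2 (fun k => c.getD k 0)

theorem pvNodeGain_eq_sum (c : List Int) (edges : List (Int × Int × Int)) (j : Nat)
    (hn : 0 < c.length) (hj : j < c.length)
    (hE : ∀ e ∈ edges, PySem.Raise.InRange c.length e.1 ∧ PySem.Raise.InRange c.length e.2.1) :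
    pvNodeGain c (j : Int) edges = (edges.map (pvContrib c c.length j)).sum := by
  unfold pvNodeGain
  show pvCutWeight (PySem.List.pySetD c (j : Int) (1 - PySem.List.pyGetD c (j : Int) 0)) edges
      - pvCutWeight c edges = (edges.map (pvContrib c c.length j)).sum
  have hflip : PySem.List.pySetD c (j : Int) (1 - PySem.List.pyGetD c (j : Int) 0)
      = c.set j (1 - c.getD j 0) := by
    rw [PySem.List.pySetD_of_nonneg c _ (by omega)]
    rw [pvGetD_nrm c (j : Int) 0 hn ⟨by omega, by exact_mod_cast hj⟩]
    have hc : ((pvNrm c.length (j : Int) : Nat) : Int) = (j : Int) :=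
      pvNrm_of_nonneg (by omega) (by exact_mod_cast hj)
    have hjj : pvNrm c.length (j : Int) = j := by omega
    rw [hjj]
    simp
  rw [hflip]
  have hlen : (c.set j (1 - c.getD j 0)).length = c.length := by simp
  rw [pvCutWeight_eq c edges hn hE,
    pvCutWeight_eq (c.set j (1 - c.getD j 0)) edges (by omega) (by rw [hlen]; exact hE)]
  rw [hlen, pvSum_map_sub]
  apply congrArg
  apply List.map_congr_left
  intro e he
  exact pvTm_flip c j e hn hj (hE e he).1 (hE e he).2

-- ===== B-side: adjacency rows and the same sum =====

theorem pvBuildAdj_go (n : Nat) (hn : 0 < n) (es : List (Int × Int × Int))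
    (adj : List (List (Int × Int))) (hlen : adj.length = n) (j : Nat) (hj : j < n)
    (hNA : ∀ e ∈ es, pvNoAlias n e) :
    (es.foldl (fun adj e =>
      if e.1 ≠ e.2.1 then
        (adj.modify (PySem.Int.mod e.1 (n : Int)).toNat (· ++ [(e.2.1, e.2.2)])).modify
          (PySem.Int.mod e.2.1 (n : Int)).toNat (· ++ [(e.1, e.2.2)])
      else adj) adj).getD j []
    = adj.getD j [] ++ es.filterMap (pvRowEntry n j) := by
  induction es generalizing adj with
  | nil => simp
  | cons e es ih =>
    have hNAe : pvNoAlias n e := hNA e (by simp)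
    have hNA' : ∀ e' ∈ es, pvNoAlias n e' := fun e' he' => hNA e' (List.mem_cons_of_mem _ he')
    have hll := pvNrm_lt n hn e.1
    have hrl := pvNrm_lt n hn e.2.1
    simp only [List.foldl_cons]
    rcases eq_or_ne (pvNrm n e.1) (pvNrm n e.2.1) with heq | hne
    · have heq' : e.1 = e.2.1 := hNAe heq
      rw [List.filterMap_cons_none (by rw [pvRowEntry, if_pos heq])]
      have hstep : (if e.1 ≠ e.2.1 then
          ((adj.modify (PySem.Int.mod e.1 (n : Int)).toNat
              (· ++ [(e.2.1, e.2.2)])).modify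
            (PySem.Int.mod e.2.1 (n : Int)).toNat (· ++ [(e.1, e.2.2)]))
          else adj) = adj := by
        rw [if_neg (by simp [heq'])]
      simp only [hstep]
      exact ih adj hlen hNA'
    · have hne' : e.1 ≠ e.2.1 := by
        intro h
        exact hne (by rw [h])
      simp only [ne_eq, hne', not_false_eq_true, if_pos]
      set adj' := (adj.modify (PySem.Int.mod e.1 (n : Int)).toNat
          (· ++ [(e.2.1, e.2.2)])).modify
          (PySem.Int.mod e.2.1 (n : Int)).toNat
          (· ++ [(e.1, e.2.2)]) with hadj'
      have hlen' : adj'.length = n := by simp [hadj', hlen]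
      rw [ih adj' hlen' hNA']
      have hl' : (PySem.Int.mod e.1 (n : Int)).toNat = pvNrm n e.1 := rfl
      have hr' : (PySem.Int.mod e.2.1 (n : Int)).toNat = pvNrm n e.2.1 := rfl
      have hrow : adj'.getD j [] = adj.getD j [] ++ (pvRowEntry n j e).toList := by
        have hjlen : j < adj.length := by omega
        have hjlen' : j < adj'.length := by omega
        rw [List.getD_eq_getElem _ _ hjlen', List.getD_eq_getElem _ _ hjlen]
        simp only [hadj', List.getElem_modify, hl', hr']
        rw [pvRowEntry, if_neg hne]
        rcases eq_or_ne (pvNrm n e.1) j with hlj | hlj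
        · rw [if_neg (by omega), if_pos hlj]
          simp [hlj]
        · rcases eq_or_ne (pvNrm n e.2.1) j with hrj | hrj
          · rw [if_pos hrj, if_neg hlj]
            simp [hlj, hrj]
          · rw [if_neg hrj, if_neg hlj]
            simp [hlj, hrj]
      rw [hrow]
      rcases h : pvRowEntry n j e with _ | p <;> simp [h, List.append_assoc]

theorem pvBuildAdj_row (n : Nat) (hn : 0 < n) (edges : List (Int × Int × Int)) (j : Nat)
    (hj : j < n) (hNA : ∀ e ∈ edges, pvNoAlias n e) :
    (pvBuildAdj n edges).getD j [] = edges.filterMap (pvRowEntry n j) := by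
  unfold pvBuildAdj
  rw [pvBuildAdj_go n hn edges (List.replicate n []) (by simp) j hj hNA]
  rw [List.getD_eq_getElem _ _ (by simpa using hj)]
  simp

theorem pvGainB_filterMap (c : List Int) (x : Int) (n j : Nat)
    (es : List (Int × Int × Int)) (s : Int) :
    (es.filterMap (pvRowEntry n j)).foldl (fun g p =>
        g + p.2 * ((if 1 - x ≠ PySem.List.pyGetD c p.1 0 then 1 else 0)
                 - (if x ≠ PySem.List.pyGetD c p.1 0 then 1 else 0))) s
    = s + (es.map (fun e => ((pvRowEntry n j e).map (fun p =>
        p.2 * ((if 1 - x ≠ PySem.List.pyGetD c p.1 0 then 1 else 0)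
             - (if x ≠ PySem.List.pyGetD c p.1 0 then 1 else 0)))).getD 0)).sum := by
  induction es generalizing s with
  | nil => simp
  | cons e es ih =>
    simp only [List.map_cons, List.sum_cons]
    rcases h : pvRowEntry n j e with _ | p
    · rw [List.filterMap_cons_none h, ih]
      simp
    · rw [List.filterMap_cons_some h, List.foldl_cons, ih]
      simp only [Option.map_some, Option.getD_some]
      ring

-- the row term of an edge equals its gain contribution
theorem pvRowTerm_eq_contrib (c : List Int) (n j : Nat) (e : Int × Int × Int)
    (hn : 0 < n) (hcn : c.length = n)
    (h1 : PySem.Raise.InRange n e.1) (h2 : PySem.Raise.InRange n e.2.1) :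
    ((pvRowEntry n j e).map (fun p =>
        p.2 * ((if 1 - c.getD j 0 ≠ PySem.List.pyGetD c p.1 0 then 1 else 0)
             - (if c.getD j 0 ≠ PySem.List.pyGetD c p.1 0 then 1 else 0)))).getD 0
    = pvContrib c n j e := by
  subst hcn
  have hg1 := pvGetD_nrm c e.1 0 hn h1
  have hg2 := pvGetD_nrm c e.2.1 0 hn h2
  unfold pvRowEntry pvContrib pvDelta
  rcases eq_or_ne (pvNrm c.length e.1) (pvNrm c.length e.2.1) with hlr | hlr
  · simp [hlr]
  · rcases eq_or_ne (pvNrm c.length e.1) j with hlj | hlj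
    · simp only [if_neg hlr, if_pos hlj, Option.map_some, Option.getD_some, hg2]
    · rcases eq_or_ne (pvNrm c.length e.2.1) j with hrj | hrj
      · simp only [if_neg hlr, if_neg hlj, if_pos hrj, Option.map_some, Option.getD_some, hg1]
      · simp [if_neg hlr, if_neg hlj, if_neg hrj]

-- the gains agree node by node
theorem pvGain_eq (c : List Int) (edges : List (Int × Int × Int)) (n j : Nat)
    (hn : 0 < n) (hcn : c.length = n) (hj : j < n)
    (hE : ∀ e ∈ edges, PySem.Raise.InRange n e.1 ∧ PySem.Raise.InRange n e.2.1)
    (hNA : ∀ e ∈ edges, pvNoAlias n e) :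
    pvGainB c ((pvBuildAdj n edges).getD j []) (c.getD j 0)
      = pvNodeGain c (j : Int) edges := by
  rw [pvNodeGain_eq_sum c edges j (by omega) (by omega) (by rw [hcn]; exact hE)]
  rw [pvBuildAdj_row n hn edges j hj hNA]
  unfold pvGainB
  rw [pvGainB_filterMap c (c.getD j 0) n j edges 0, Int.zero_add]
  apply congrArg
  apply List.map_congr_left
  intro e he
  rw [pvRowTerm_eq_contrib c n j e hn hcn (hE e he).1 (hE e he).2, hcn]

-- ===== selection: Python max over (gain, node) vs B's running best =====

theorem pvSelRel (G : Int → Int) (l : List Int) (hpw : l.Pairwise (· < ·)) :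
    ∀ sA sB : Int × Int, (∀ j ∈ l, sA.2 < j) → 0 ≤ sA.2 →
    ((sB = sA ∧ 0 ≤ sA.1) ∨ (sB = (0, -1) ∧ sA.1 < 0)) →
    ((l.foldl (fun b i => if G i ≥ b.1 then (G i, i) else b) sB
        = l.foldl (fun a i => if a.1 < G i ∨ (a.1 = G i ∧ a.2 < i) then (G i, i) else a) sA
      ∧ 0 ≤ (l.foldl (fun a i => if a.1 < G i ∨ (a.1 = G i ∧ a.2 < i) then (G i, i) else a) sA).1
      ∧ 0 ≤ (l.foldl (fun a i => if a.1 < G i ∨ (a.1 = G i ∧ a.2 < i) then (G i, i) else a) sA).2)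
     ∨ (l.foldl (fun b i => if G i ≥ b.1 then (G i, i) else b) sB = (0, -1)
      ∧ (l.foldl (fun a i => if a.1 < G i ∨ (a.1 = G i ∧ a.2 < i) then (G i, i) else a) sA).1 < 0)) := by
  induction l with
  | nil =>
    intro sA sB _ h2 h3
    rcases h3 with ⟨h, h'⟩ | ⟨h, h'⟩
    · exact Or.inl ⟨h, h', h2⟩
    · exact Or.inr ⟨h, h'⟩
  | cons i l ih =>
    intro sA sB h1 h2 h3
    have hi : sA.2 < i := h1 i (by simp)
    have hpw' : l.Pairwise (· < ·) := hpw.tail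
    have hil : ∀ j ∈ l, i < j := fun j hj => (List.pairwise_cons.mp hpw).1 j hj
    have hmem' : ∀ j ∈ l, ((G i, i) : Int × Int).2 < j := fun j hj => hil j hj
    simp only [List.foldl_cons]
    have h1' : ∀ j ∈ l, sA.2 < j := fun j hj => h1 j (List.mem_cons_of_mem _ hj)
    rcases h3 with ⟨hB, hA⟩ | ⟨hB, hA⟩
    · rw [hB]
      rcases le_or_gt sA.1 (G i) with hle | hlt
      · rw [if_pos (show sA.1 < G i ∨ (sA.1 = G i ∧ sA.2 < i) by omega),
          if_pos (show G i ≥ sA.1 from hle)]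
        exact ih hpw' (G i, i) (G i, i) hmem' (show (0:Int) ≤ i by omega)
          (Or.inl ⟨rfl, show (0:Int) ≤ G i by omega⟩)
      · rw [if_neg (show ¬(sA.1 < G i ∨ (sA.1 = G i ∧ sA.2 < i)) by omega),
          if_neg (show ¬(G i ≥ sA.1) by omega)]
        exact ih hpw' sA sA h1' h2 (Or.inl ⟨rfl, hA⟩)
    · rw [hB]
      rcases le_or_gt 0 (G i) with hge | hneg
      · rw [if_pos (show sA.1 < G i ∨ (sA.1 = G i ∧ sA.2 < i) by omega),
          if_pos (show G i ≥ ((0, -1) : Int × Int).1 by simpa using hge)]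
        exact ih hpw' (G i, i) (G i, i) hmem' (show (0:Int) ≤ i by omega)
          (Or.inl ⟨rfl, hge⟩)
      · rw [if_neg (show ¬(G i ≥ ((0, -1) : Int × Int).1) by simp; omega)]
        rcases le_or_gt sA.1 (G i) with hle | hlt
        · rw [if_pos (show sA.1 < G i ∨ (sA.1 = G i ∧ sA.2 < i) by omega)]
          exact ih hpw' (G i, i) (0, -1) hmem' (show (0:Int) ≤ i by omega)
            (Or.inr ⟨rfl, show ((G i, i) : Int × Int).1 < 0 by simpa using hneg⟩)
        · rw [if_neg (show ¬(sA.1 < G i ∨ (sA.1 = G i ∧ sA.2 < i)) by omega)]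
          exact ih hpw' sA (0, -1) h1' h2 (Or.inr ⟨rfl, hA⟩)

-- one iteration: A's (best_gain, best_node) and B's agree up to the stop test
theorem pvBest_cases (c : List Int) (edges : List (Int × Int × Int)) (n : Nat)
    (hn : 0 < n) (hcn : c.length = n)
    (hE : ∀ e ∈ edges, PySem.Raise.InRange n e.1 ∧ PySem.Raise.InRange n e.2.1)
    (hNA : ∀ e ∈ edges, pvNoAlias n e) :
    ((pvBestFold c (pvBuildAdj n edges)
        = pvPairMax (pvNodeGain c 0 edges, 0) ((PySem.List.pyRange 1 (c.length : Int) 1).map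
            (fun i => (pvNodeGain c i edges, i)))
      ∧ 0 ≤ (pvPairMax (pvNodeGain c 0 edges, 0) ((PySem.List.pyRange 1 (c.length : Int) 1).map
            (fun i => (pvNodeGain c i edges, i)))).1
      ∧ 0 ≤ (pvPairMax (pvNodeGain c 0 edges, 0) ((PySem.List.pyRange 1 (c.length : Int) 1).map
            (fun i => (pvNodeGain c i edges, i)))).2)
     ∨ (pvBestFold c (pvBuildAdj n edges) = (0, -1)
      ∧ (pvPairMax (pvNodeGain c 0 edges, 0) ((PySem.List.pyRange 1 (c.length : Int) 1).map
            (fun i => (pvNodeGain c i edges, i)))).1 < 0)) := by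
  have hBfun : pvBestFold c (pvBuildAdj n edges)
      = (PySem.List.pyRange 0 (c.length : Int) 1).foldl
        (fun b i => if pvNodeGain c i edges ≥ b.1 then (pvNodeGain c i edges, i) else b)
        (0, -1) := by
    unfold pvBestFold
    apply PySem.List.foldl_congr_mem
    intro b i hi
    have hmem := PySem.List.mem_pyRange_one.mp hi
    obtain ⟨j, hji, hjn⟩ : ∃ j : Nat, (j : Int) = i ∧ j < n := ⟨i.toNat, by omega, by omega⟩
    subst hji
    show (let x := PySem.List.pyGetD c ((j : Nat) : Int) 0;
      let g := pvGainB c (PySem.List.pyGetD (pvBuildAdj n edges) ((j : Nat) : Int) []) x;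
      if g ≥ b.1 then (g, ((j : Nat) : Int)) else b) = _
    simp only [PySem.List.pyGetD_natCast]
    rw [pvGain_eq c edges n j hn hcn hjn hE hNA]
  have hsplit : PySem.List.pyRange 0 (c.length : Int) 1
      = 0 :: PySem.List.pyRange 1 (c.length : Int) 1 := by
    have := PySem.List.pyRange_one_cons (a := 0) (b := (c.length : Int)) (by omega)
    simpa using this
  have hA : pvPairMax (pvNodeGain c 0 edges, 0) ((PySem.List.pyRange 1 (c.length : Int) 1).map
        (fun i => (pvNodeGain c i edges, i)))
      = (PySem.List.pyRange 1 (c.length : Int) 1).foldl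
        (fun a i => if a.1 < pvNodeGain c i edges ∨ (a.1 = pvNodeGain c i edges ∧ a.2 < i)
          then (pvNodeGain c i edges, i) else a) (pvNodeGain c 0 edges, 0) := by
    unfold pvPairMax
    rw [List.foldl_map]
  rw [hBfun, hsplit, List.foldl_cons, hA]
  have hpw := PySem.List.pairwise_lt_pyRange_one 1 (c.length : Int)
  have hmem1 : ∀ j ∈ PySem.List.pyRange 1 (c.length : Int) 1,
      ((pvNodeGain c 0 edges, (0 : Int)) : Int × Int).2 < j := by
    intro j hj
    have := (PySem.List.mem_pyRange_one.mp hj).1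
    show (0 : Int) < j
    omega
  rcases le_or_gt 0 (pvNodeGain c 0 edges) with hge | hneg
  · rw [if_pos (show pvNodeGain c 0 edges ≥ ((0, -1) : Int × Int).1 by simpa using hge)]
    exact pvSelRel (fun i => pvNodeGain c i edges) _ hpw (pvNodeGain c 0 edges, 0)
      (pvNodeGain c 0 edges, 0) hmem1 (by simp) (Or.inl ⟨rfl, hge⟩)
  · rw [if_neg (show ¬(pvNodeGain c 0 edges ≥ ((0, -1) : Int × Int).1) by simp; omega)]
    exact pvSelRel (fun i => pvNodeGain c i edges) _ hpw (pvNodeGain c 0 edges, 0)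
      (0, -1) hmem1 (by simp) (Or.inr ⟨rfl, hneg⟩)

theorem pvLoop_eq (edges : List (Int × Int × Int)) (n : Nat) (hn : 0 < n)
    (hE : ∀ e ∈ edges, PySem.Raise.InRange n e.1 ∧ PySem.Raise.InRange n e.2.1)
    (hNA : ∀ e ∈ edges, pvNoAlias n e) :
    ∀ (f : Nat) (c : List Int), c.length = n →
      pvALoop edges f c = pvBLoop (pvBuildAdj n edges) f c := by
  intro f
  induction f with
  | zero => intro c _; rfl
  | succ f ih =>
    intro c hcn
    have hcons : PySem.List.pyRange 0 (c.length : Int) 1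
        = 0 :: PySem.List.pyRange 1 (c.length : Int) 1 := by
      have := PySem.List.pyRange_one_cons (a := 0) (b := (c.length : Int)) (by omega)
      simpa using this
    have hbest := pvBest_cases c edges n hn hcn hE hNA
    set rA := pvPairMax (pvNodeGain c 0 edges, 0) ((PySem.List.pyRange 1 (c.length : Int) 1).map
        (fun i => (pvNodeGain c i edges, i))) with hrA
    set rB := pvBestFold c (pvBuildAdj n edges) with hrB
    have hAstep : pvALoop edges (f + 1) c
        = if rA.1 ≤ 0 then c
          else pvALoop edges f (PySem.List.pySetD c rA.2 (1 - PySem.List.pyGetD c rA.2 0)) := by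
      rw [hrA]
      conv_lhs => rw [pvALoop]
      rw [hcons]
      rfl
    have hBstep : pvBLoop (pvBuildAdj n edges) (f + 1) c
        = if rB.2 < 0 ∨ rB.1 ≤ 0 then c
          else pvBLoop (pvBuildAdj n edges) f
            (PySem.List.pySetD c rB.2 (1 - PySem.List.pyGetD c rB.2 0)) := by
      rw [hrB]
      conv_lhs => rw [pvBLoop]
    rw [hAstep, hBstep]
    rcases hbest with ⟨hEq, hA1, hA2⟩ | ⟨hB0, hAneg⟩
    · rcases le_or_gt rA.1 0 with hstop | hgo
      · rw [if_pos hstop, if_pos (show rB.2 < 0 ∨ rB.1 ≤ 0 by rw [hEq]; omega)]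
      · rw [if_neg (show ¬ rA.1 ≤ 0 by omega),
          if_neg (show ¬(rB.2 < 0 ∨ rB.1 ≤ 0) by rw [hEq]; omega), hEq]
        exact ih _ (by simp [hcn])
    · rw [if_pos (show rA.1 ≤ 0 by omega),
        if_pos (show rB.2 < 0 ∨ rB.1 ≤ 0 by rw [hB0]; norm_num)]

-- ===== VERDICT (by name: the statement is the Claim_ definition above) =====
theorem greedy_gain_flips_spec : Claim_equal_greedy_gain_flips := by
  intro assignment edges _ hpre
  obtain ⟨hne, hE⟩ := hpre
  have hn : 0 < assignment.length := by
    cases assignment with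
    | nil => exact absurd rfl hne
    | cons a l => simp
  unfold Spec_greedy_gain_flips greedy_gain_flips greedy_gain_flips_alt
  exact pvLoop_eq edges assignment.length hn
    (fun e he => ⟨(hE e he).1, (hE e he).2.1⟩)
    (fun e he heq => (hE e he).2.2 (by
      unfold pvNrm at heq
      have h1 := PySem.Int.mod_nonneg e.1 (show (0:Int) < assignment.length by omega)
      have h2 := PySem.Int.mod_nonneg e.2.1 (show (0:Int) < assignment.length by omega)
      omega))
    (pvFuel edges) assignment rfl
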